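-- pv_equiv track=rewrite | github.com/ablab/spades | assembler/src/spades_pipeline/truspades/id_generation.py | generate_id_candidates_for_barcode
-- ===== SOURCE A (Python) =====
-- def generate_id_candidates_for_barcode(all_lcs, line):
--     id_candidate = []
--     cur = ""
--     pos = 0
--     for i in range(len(line)):
--         if pos < len(all_lcs) and line[i] == all_lcs[pos]:
--             pos += 1
--             if cur != "":
--                 id_candidate.append(cur)
--                 cur = ""
--         else:
--             cur = cur + line[i]
--     if cur != "":
--         id_candidate.append(cur)
--     return id_candidate
-- ===== SOURCE B (Python) =====
-- def generate_id_candidates_for_barcode(all_lcs, line):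
--     # Pass 1: record the indices where the greedy subsequence match consumes a char.
--     cuts = []
--     pos = 0
--     for i, c in enumerate(line):
--         if pos < len(all_lcs) and c == all_lcs[pos]:
--             cuts.append(i)
--             pos += 1
--     # Pass 2: slice line at those indices, keeping only the non-empty gaps.
--     res = []
--     prev = 0
--     for j in cuts:
--         if prev < j:
--             res.append(line[prev:j])
--         prev = j + 1
--     if prev < len(line):
--         res.append(line[prev:])
--     return res
-- ===== Notes on version B (the rewrite author's own statement) =====
-- stated objective: alternative
-- what changed: Replaces the single accumulate-and-flush loop with a cut-index table built in one pass followed by a separate slicing pass over the recorded indices.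
import Mathlib
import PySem

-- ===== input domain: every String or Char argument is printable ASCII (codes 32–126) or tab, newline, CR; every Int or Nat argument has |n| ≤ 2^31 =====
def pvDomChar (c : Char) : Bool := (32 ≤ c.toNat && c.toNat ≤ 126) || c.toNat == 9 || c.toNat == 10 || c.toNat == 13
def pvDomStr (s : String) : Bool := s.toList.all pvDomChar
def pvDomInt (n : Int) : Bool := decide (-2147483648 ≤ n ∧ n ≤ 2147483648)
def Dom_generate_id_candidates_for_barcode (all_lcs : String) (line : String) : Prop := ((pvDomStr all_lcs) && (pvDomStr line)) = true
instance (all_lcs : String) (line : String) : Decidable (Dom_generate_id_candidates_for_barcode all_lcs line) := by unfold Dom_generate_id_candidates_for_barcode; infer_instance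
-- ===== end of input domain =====

-- B replaces A's single accumulate-and-flush loop by a cut-index table plus a separate
-- slicing pass (alternative decomposition, same cost); return values are proved equal.

-- ===== PORT A =====
-- A's loop over i in range(len(line)): state (id_candidate, cur, pos); line[i] is the
-- successive character, so the loop is structural recursion over line's characters.
def pvALoop (lcs : List Char) : List String → List Char → Nat → List Char → List String
  | acc, cur, _pos, [] => if cur ≠ [] then acc ++ [String.mk cur] else acc
  | acc, cur, pos, c :: cs =>
    if pos < lcs.length ∧ c = lcs.getD pos ' ' then
      if cur ≠ [] then pvALoop lcs (acc ++ [String.mk cur]) [] (pos + 1) cs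
      else pvALoop lcs acc [] (pos + 1) cs
    else pvALoop lcs acc (cur ++ [c]) pos cs

def generate_id_candidates_for_barcode (all_lcs : String) (line : String) : List String :=
  pvALoop all_lcs.toList [] [] 0 line.toList

-- ===== PORT B =====
-- Pass 1: indices where the greedy subsequence match consumes a character.
def pvCuts (lcs : List Char) : Nat → Nat → List Char → List Nat
  | _pos, _i, [] => []
  | pos, i, c :: cs =>
    if pos < lcs.length ∧ c = lcs.getD pos ' ' then i :: pvCuts lcs (pos + 1) (i + 1) cs
    else pvCuts lcs pos (i + 1) cs

-- Pass 2: slice line at the cut indices, keeping non-empty gaps; line[prev:j] for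
-- 0 ≤ prev ≤ j is (line.drop prev).take (j - prev), line[prev:] is line.drop prev.
def pvGaps (line : List Char) : Nat → List Nat → List String
  | prev, [] => if prev < line.length then [String.mk (line.drop prev)] else []
  | prev, j :: js =>
    if prev < j then String.mk ((line.drop prev).take (j - prev)) :: pvGaps line (j + 1) js
    else pvGaps line (j + 1) js

def generate_id_candidates_for_barcode_alt (all_lcs : String) (line : String) : List String :=
  pvGaps line.toList 0 (pvCuts all_lcs.toList 0 0 line.toList)

-- ===== PRECONDITION & SPEC =====
def Spec_generate_id_candidates_for_barcode (all_lcs : String) (line : String) (out : List String) : Prop := out = generate_id_candidates_for_barcode_alt all_lcs line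
instance (all_lcs : String) (line : String) (out : List String) : Decidable (Spec_generate_id_candidates_for_barcode all_lcs line out) := by unfold Spec_generate_id_candidates_for_barcode; infer_instance

-- ===== CLAIM (what is proved, stated in full; the proofs are below) =====
def Claim_equal_generate_id_candidates_for_barcode : Prop := ∀ (all_lcs : String) (line : String), Dom_generate_id_candidates_for_barcode all_lcs line → Spec_generate_id_candidates_for_barcode all_lcs line (generate_id_candidates_for_barcode all_lcs line)

-- ===== LEMMAS AND PROOFS =====

-- accumulator-free form of A's loop, used only by the proof
def pvAGo (lcs : List Char) : List Char → Nat → List Char → List String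
  | cur, _pos, [] => if cur = [] then [] else [String.mk cur]
  | cur, pos, c :: cs =>
    if pos < lcs.length ∧ c = lcs.getD pos ' ' then
      if cur = [] then pvAGo lcs [] (pos + 1) cs
      else String.mk cur :: pvAGo lcs [] (pos + 1) cs
    else pvAGo lcs (cur ++ [c]) pos cs

theorem pvALoop_eq (lcs : List Char) :
    ∀ (cs : List Char) (acc : List String) (cur : List Char) (pos : Nat),
    pvALoop lcs acc cur pos cs = acc ++ pvAGo lcs cur pos cs := by
  intro cs
  induction cs with
  | nil =>
    intro acc cur pos
    simp only [pvALoop, pvAGo]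
    by_cases h : cur = [] <;> simp [h]
  | cons c cs ih =>
    intro acc cur pos
    simp only [pvALoop, pvAGo]
    split_ifs with h1 h2 h3 <;> simp_all

theorem pvGaps_eq (lcs : List Char) :
    ∀ (cs line : List Char) (pos prev i : Nat),
    prev ≤ i → line.drop i = cs →
    pvGaps line prev (pvCuts lcs pos i cs) =
      pvAGo lcs ((line.drop prev).take (i - prev)) pos cs := by
  intro cs
  induction cs with
  | nil =>
    intro line pos prev i hpi hdrop
    have hlen : line.length ≤ i := List.drop_eq_nil_iff.mp hdrop
    have htake : (line.drop prev).take (i - prev) = line.drop prev :=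
      List.take_of_length_le (by simp; omega)
    simp only [pvCuts, pvGaps, pvAGo, htake]
    by_cases h : line.length ≤ prev
    · simp [List.drop_eq_nil_iff.mpr h, Nat.not_lt.mpr h]
    · have : line.drop prev ≠ [] := by
        simp [List.drop_eq_nil_iff]; omega
      simp [this, Nat.lt_of_not_le h]
  | cons c cs ih =>
    intro line pos prev i hpi hdrop
    have hi : i < line.length := by
      by_contra h
      rw [List.drop_eq_nil_iff.mpr (by omega)] at hdrop
      simp at hdrop
    have hdrop' : line.drop (i + 1) = cs := by
      have h1 : (line.drop i).tail = cs := by rw [hdrop]; rfl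
      rwa [List.tail_drop] at h1
    have hsplit : line.drop prev = (line.drop prev).take (i - prev) ++ (c :: cs) := by
      conv_lhs => rw [← List.take_append_drop (i - prev) (line.drop prev)]
      rw [List.drop_drop, show prev + (i - prev) = i by omega, hdrop]
    have hlt_take : ((line.drop prev).take (i - prev)).length = i - prev := by
      rw [List.length_take, List.length_drop]; omega
    have htake : (line.drop prev).take (i + 1 - prev)
        = (line.drop prev).take (i - prev) ++ [c] := by
      conv_lhs => rw [hsplit]
      rw [List.take_append, List.take_of_length_le (by omega), hlt_take,
        show i + 1 - prev - (i - prev) = 1 by omega]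
      rfl
    simp only [pvCuts]
    by_cases hcond : pos < lcs.length ∧ c = lcs.getD pos ' '
    · have hrest := ih line (pos + 1) (i + 1) (i + 1) (le_refl _) hdrop'
      simp only [Nat.sub_self, List.take_zero] at hrest
      simp only [if_pos hcond, pvGaps, pvAGo]
      by_cases hlt : prev < i
      · have hne : (line.drop prev).take (i - prev) ≠ [] := by
          intro hE
          have := congrArg List.length hE
          rw [hlt_take] at this
          simp at this
          omega
        simp [hlt, hne, hrest]
      · have hpe : (line.drop prev).take (i - prev) = [] := by
          rw [show i - prev = 0 by omega]; rfl
        simp [hlt, hpe, hrest]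
    · have hrest := ih line pos prev (i + 1) (by omega) hdrop'
      simp only [pvAGo, if_neg hcond]
      rw [hrest, htake]

theorem generate_id_candidates_for_barcode_eq (all_lcs line : String) :
    generate_id_candidates_for_barcode all_lcs line =
      generate_id_candidates_for_barcode_alt all_lcs line := by
  unfold generate_id_candidates_for_barcode generate_id_candidates_for_barcode_alt
  rw [pvALoop_eq, pvGaps_eq all_lcs.toList line.toList line.toList 0 0 0 (le_refl _) rfl]
  simp

-- ===== VERDICT (by name: the statement is the Claim_ definition above) =====
theorem generate_id_candidates_for_barcode_spec : Claim_equal_generate_id_candidates_for_barcode := by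
  intro all_lcs line _
  unfold Spec_generate_id_candidates_for_barcode
  exact generate_id_candidates_for_barcode_eq all_lcs line
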